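-- pv_equiv track=rewrite | github.com/sarah-larkin/de-be-katas-sl | src/sum_duplicates.py | sum_consecutive_duplicates
-- ===== SOURCE A (Python) =====
-- def sum_consecutive_duplicates(num_list):
--     temp_list = []
--     output = []
--     for num in num_list:
--         #appending to tempt list to collect duplicate
--         if len(temp_list) == 0 or num in temp_list: #if temp_list is empty or num is in temp_list
--             temp_list.append(num)
--         #if not matching
--         else:
--             output.append(sum(temp_list))
--             temp_list = [num] # simpler override of temp_list
--     #after for loop completed
--     if temp_list:
--         output.append(sum(temp_list)) #for final iteration
--
--     return output
-- ===== SOURCE B (Python) =====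
-- def sum_consecutive_duplicates(num_list):
--     output = []
--     prev = None
--     run_sum = 0
--     for num in num_list:
--         if prev is not None and num != prev:
--             output.append(run_sum)
--             run_sum = 0
--         run_sum += num
--         prev = num
--     if prev is not None:
--         output.append(run_sum)
--     return output
-- ===== Notes on version B (the rewrite author's own statement) =====
-- stated objective: faster
-- what changed: Replaced A's temp_list with membership scan and re-summing per run by a single pass tracking the previous element and a running sum, appending on value change.
import Mathlib
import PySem

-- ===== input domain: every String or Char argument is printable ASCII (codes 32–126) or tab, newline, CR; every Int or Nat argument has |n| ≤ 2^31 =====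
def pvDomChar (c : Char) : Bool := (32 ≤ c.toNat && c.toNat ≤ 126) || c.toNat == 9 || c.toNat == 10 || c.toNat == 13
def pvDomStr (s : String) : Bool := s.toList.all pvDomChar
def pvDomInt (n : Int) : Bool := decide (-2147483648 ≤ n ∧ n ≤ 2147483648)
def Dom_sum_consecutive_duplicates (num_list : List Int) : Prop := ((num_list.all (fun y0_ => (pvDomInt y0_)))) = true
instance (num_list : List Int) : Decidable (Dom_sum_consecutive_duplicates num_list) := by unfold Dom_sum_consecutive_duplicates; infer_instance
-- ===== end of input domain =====

-- B replaces A's quadratic temp_list (membership scan + re-sum per run) by a single pass keeping the previous element and a running sum (objective: faster).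


-- ===== PORT A =====
-- A's loop: state (temp_list, output); membership test and re-sum as in the Python
def pvALoop : List Int → List Int → List Int → List Int
  | temp, output, [] =>
      if temp ≠ [] then output ++ [temp.sum] else output
  | temp, output, num :: rest =>
      if temp.length = 0 ∨ num ∈ temp then pvALoop (temp ++ [num]) output rest
      else pvALoop [num] (output ++ [temp.sum]) rest

def sum_consecutive_duplicates (num_list : List Int) : List Int :=
  pvALoop [] [] num_list

-- ===== PORT B =====
-- B's loop: state (prev : Option Int, run_sum, output); one pass, append on change
def pvBLoop : Option Int → Int → List Int → List Int → List Int
  | prev, s, output, [] =>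
      match prev with
      | none => output
      | some _ => output ++ [s]
  | prev, s, output, num :: rest =>
      match prev with
      | some p =>
          if num ≠ p then pvBLoop (some num) (0 + num) (output ++ [s]) rest
          else pvBLoop (some num) (s + num) output rest
      | none => pvBLoop (some num) (s + num) output rest

def sum_consecutive_duplicates_alt (num_list : List Int) : List Int :=
  pvBLoop none 0 [] num_list

-- ===== PRECONDITION & SPEC =====
def Spec_sum_consecutive_duplicates (num_list : List Int) (out : List Int) : Prop := out = sum_consecutive_duplicates_alt num_list
instance (num_list : List Int) (out : List Int) : Decidable (Spec_sum_consecutive_duplicates num_list out) := by unfold Spec_sum_consecutive_duplicates; infer_instance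

-- ===== CLAIM (what is proved, stated in full; the proofs are below) =====
def Claim_equal_sum_consecutive_duplicates : Prop := ∀ (num_list : List Int), Dom_sum_consecutive_duplicates num_list → Spec_sum_consecutive_duplicates num_list (sum_consecutive_duplicates num_list)

-- ===== LEMMAS AND PROOFS =====

-- Invariant: A's temp_list is a nonempty list of copies of v with sum s; then the loops agree.
theorem pvLoop_agree (rest : List Int) : ∀ (v : Int) (temp out : List Int),
    temp ≠ [] → (∀ x ∈ temp, x = v) →
    pvALoop temp out rest = pvBLoop (some v) temp.sum out rest := by
  induction rest with
  | nil =>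
      intro v temp out hne _
      simp [pvALoop, pvBLoop, hne]
  | cons num rest ih =>
      intro v temp out hne hall
      have hmem : (num ∈ temp) ↔ num = v := by
        constructor
        · exact fun h => hall num h
        · intro h; subst h
          match temp, hne with
          | t :: ts, _ =>
            have := hall t (by simp)
            simp [this]
      by_cases h : num = v
      · have hin : temp.length = 0 ∨ num ∈ temp := Or.inr (hmem.mpr h)
        rw [pvALoop, if_pos hin, pvBLoop]
        subst h
        simp only [ne_eq, not_true_eq_false, if_false]
        rw [ih num (temp ++ [num]) out (by simp) (by intro x hx; rcases List.mem_append.mp hx with h1 | h1; exact hall x h1; simpa using h1)]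
        simp [Int.add_comm]
      · have hnin : ¬ (temp.length = 0 ∨ num ∈ temp) := by
          rw [hmem]
          simp [h, List.length_eq_zero_iff, hne]
        rw [pvALoop, if_neg hnin, pvBLoop]
        simp only [ne_eq, h, not_false_eq_true, if_true]
        rw [ih num [num] (out ++ [temp.sum]) (by simp) (by simp)]
        simp [Int.add_comm]

-- ===== VERDICT (by name: the statement is the Claim_ definition above) =====
theorem sum_consecutive_duplicates_spec : Claim_equal_sum_consecutive_duplicates := by
  intro num_list _
  unfold Spec_sum_consecutive_duplicates sum_consecutive_duplicates sum_consecutive_duplicates_alt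
  cases num_list with
  | nil => simp [pvALoop, pvBLoop]
  | cons num rest =>
      have h0 : (([] : List Int).length = 0 ∨ num ∈ ([] : List Int)) := Or.inl rfl
      rw [pvALoop, if_pos h0, pvBLoop]
      simp only [List.nil_append]
      rw [pvLoop_agree rest num [num] [] (by simp) (by simp)]
      norm_num
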